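-- pv_equiv track=rewrite | github.com/Lungu19/ct2vec | ct2vec.py | numbersAsSuffix
-- ===== SOURCE A (Python) =====
-- def numbersAsSuffix(name: str):
--     if (name[0] in "0123456789"):
--         suffix = ""
--         counter = 0
--         for char in name:
--             if char in "0123456789":
--                 suffix += char
--             else:
--                 break
--             counter+=1
--         return name[counter:] + suffix
--     else:
--         return name
-- ===== SOURCE B (Python) =====
-- def numbersAsSuffix(name: str):
--     if name[0] not in "0123456789":
--         return name
--     stripped = name.lstrip("0123456789")
--     return stripped + name[:len(name) - len(stripped)]
-- ===== Notes on version B (the rewrite author's own statement) =====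
-- stated objective: simpler
-- what changed: Replaces the explicit character-counting accumulator loop with str.lstrip over the digit set plus length arithmetic to recover the moved digit prefix.
import Mathlib
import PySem

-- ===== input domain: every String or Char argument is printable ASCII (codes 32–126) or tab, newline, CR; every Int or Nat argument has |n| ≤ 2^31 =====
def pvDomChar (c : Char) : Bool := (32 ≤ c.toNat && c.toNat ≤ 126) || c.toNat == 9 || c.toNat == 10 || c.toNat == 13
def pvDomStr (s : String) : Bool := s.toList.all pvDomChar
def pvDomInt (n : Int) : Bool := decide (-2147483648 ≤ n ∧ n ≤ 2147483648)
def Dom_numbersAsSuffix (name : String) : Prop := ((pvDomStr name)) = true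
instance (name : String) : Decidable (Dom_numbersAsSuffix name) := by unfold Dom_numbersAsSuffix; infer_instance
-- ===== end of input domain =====

-- ===== PORT A =====
-- B moves the leading digit run with lstrip + length arithmetic instead of A's counting loop (simpler).
-- A: the for-loop with break, accumulating suffix and counter.
def pvALoop : List Char → List Char → Nat → List Char × Nat
  | [], suffix, counter => (suffix, counter)
  | c :: rest, suffix, counter =>
    if ("0123456789".toList.contains c) then pvALoop rest (suffix ++ [c]) (counter + 1)
    else (suffix, counter)

def numbersAsSuffix (name : String) : String :=
  match PySem.List.pyGet? name.toList 0 with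
  | none => ""  -- name[0] raises IndexError on ""; outside Pre_
  | some c0 =>
    if ("0123456789".toList.contains c0) then
      let p := pvALoop name.toList [] 0
      String.ofList (PySem.List.slice name.toList (some (p.2 : Int)) none ++ p.1)
    else name

-- ===== PORT B =====
def numbersAsSuffix_alt (name : String) : String :=
  match PySem.List.pyGet? name.toList 0 with
  | none => ""  -- name[0] raises IndexError on ""; outside Pre_
  | some c0 =>
    if ("0123456789".toList.contains c0) then
      -- name.lstrip("0123456789") ported by hand as dropWhile over the digit set (exact for this chars argument)
      let stripped := name.toList.dropWhile (fun c => "0123456789".toList.contains c)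
      String.ofList (stripped ++ name.toList.take (name.toList.length - stripped.length))
    else name

-- ===== PRECONDITION & SPEC =====
-- Pre_ excludes only the empty string, on which A's name[0] raises IndexError.
def Pre_numbersAsSuffix (name : String) : Prop := name ≠ ""
instance (name : String) : Decidable (Pre_numbersAsSuffix name) := by unfold Pre_numbersAsSuffix; infer_instance
def pvWitness_numbersAsSuffix : String := "7a"
def Spec_numbersAsSuffix (name : String) (out : String) : Prop := out = numbersAsSuffix_alt name
instance (name : String) (out : String) : Decidable (Spec_numbersAsSuffix name out) := by unfold Spec_numbersAsSuffix; infer_instance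

-- ===== CLAIM (what is proved, stated in full; the proofs are below) =====
def Claim_equal_numbersAsSuffix : Prop := ∀ (name : String), Dom_numbersAsSuffix name → Pre_numbersAsSuffix name → Spec_numbersAsSuffix name (numbersAsSuffix name)

-- ===== LEMMAS AND PROOFS =====
theorem pvALoop_eq (l : List Char) (s : List Char) (n : Nat) :
    pvALoop l s n = (s ++ l.takeWhile (fun c => "0123456789".toList.contains c),
                     n + (l.takeWhile (fun c => "0123456789".toList.contains c)).length) := by
  induction l generalizing s n with
  | nil => simp only [pvALoop, List.takeWhile_nil, List.append_nil, List.length_nil, Nat.add_zero]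
  | cons c rest ih =>
    unfold pvALoop
    rw [List.takeWhile_cons]
    by_cases h : ("0123456789".toList.contains c) = true
    · rw [if_pos h, if_pos h, ih]
      simp only [List.append_assoc, List.singleton_append, List.length_cons]
      rw [Nat.add_assoc, Nat.add_comm 1]
    · rw [if_neg h, if_neg h]
      simp only [List.append_nil, List.length_nil, Nat.add_zero]

theorem pv_drop_takeWhile_length (p : Char → Bool) (l : List Char) :
    l.drop ((l.takeWhile p).length) = l.dropWhile p := by
  induction l with
  | nil => simp
  | cons c rest ih =>
    by_cases h : p c
    · simpa [List.takeWhile_cons, List.dropWhile_cons, h] using ih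
    · simp [List.takeWhile_cons, h]

theorem pv_take_sub_dropWhile_length (p : Char → Bool) (l : List Char) :
    l.take (l.length - (l.dropWhile p).length) = l.takeWhile p := by
  induction l with
  | nil => simp
  | cons c rest ih =>
    by_cases h : p c
    · have hle : (rest.dropWhile p).length ≤ rest.length := rest.length_dropWhile_le p
      have hsub : (c :: rest).length - (rest.dropWhile p).length
          = (rest.length - (rest.dropWhile p).length) + 1 := by
        simp only [List.length_cons]; omega
      rw [List.dropWhile_cons, if_pos h, List.takeWhile_cons, if_pos h, hsub,
        List.take_succ_cons, ih]
    · simp [List.dropWhile_cons, h]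

-- ===== VERDICT (by name: the statement is the Claim_ definition above) =====
theorem numbersAsSuffix_spec : Claim_equal_numbersAsSuffix := by
  intro name _ _
  unfold Spec_numbersAsSuffix numbersAsSuffix numbersAsSuffix_alt
  cases hl : name.toList with
  | nil => rfl
  | cons c0 rest =>
    simp only [PySem.List.pyGet?_zero_cons]
    by_cases h0 : ("0123456789".toList.contains c0) = true
    · rw [if_pos h0, if_pos h0, pvALoop_eq]
      simp only [List.nil_append, Nat.zero_add]
      rw [PySem.List.slice_from_natCast, pv_drop_takeWhile_length, pv_take_sub_dropWhile_length]
    · rw [if_neg h0, if_neg h0]
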